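-- pv_equiv track=rewrite | github.com/wryenmeek/knowledgebase | scripts/kb/page_template_utils.py | extract_sources_from_frontmatter
-- ===== SOURCE A (Python) =====
-- def strip_quotes(value: str) -> str:
--     if len(value) >= 2 and value[0] == value[-1] and value[0] in {'"', "'"}:
--         return value[1:-1]
--     return value
--
-- def extract_sources_from_frontmatter(frontmatter: str) -> list[str]:
--     """Return the list of source values from a YAML frontmatter block.
--
--     Handles three forms of the ``sources:`` key:
--
--     - Inline empty list:  ``sources: []`` → ``[]``
--     - Inline single value: ``sources: repo://...`` → ``["repo://..."]``
--     - Multi-line YAML list::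
--
--         sources:
--           - repo://first
--           - repo://second
--
--     Returns an empty list when the ``sources:`` key is absent.
--     Quotes are stripped from each value using :func:`strip_quotes`.
--     """
--     lines = frontmatter.splitlines()
--     for index, line in enumerate(lines):
--         stripped = line.strip()
--         if not stripped.startswith("sources:"):
--             continue
--         inline_value = stripped[len("sources:"):].strip()
--         if inline_value == "[]":
--             return []
--         if inline_value:
--             return [strip_quotes(inline_value)]
--         sources: list[str] = []
--         for raw_line in lines[index + 1:]:
--             if not raw_line.startswith("  "):
--                 break
--             item = raw_line.strip()
--             if item.startswith("- "):
--                 sources.append(strip_quotes(item[2:].strip()))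
--         return sources
--     return []
-- ===== SOURCE B (Python) =====
-- def strip_quotes(value: str) -> str:
--     if len(value) >= 2 and value[0] == value[-1] and value[0] in {'"', "'"}:
--         return value[1:-1]
--     return value
--
--
-- def extract_sources_from_frontmatter(frontmatter: str) -> list[str]:
--     """Single-pass state machine: one flat scan over the lines with an
--     explicit state (SEARCH / BLOCK / DONE) and an accumulator; no nested
--     loop, no early return — the answer is whatever was accumulated when
--     the scan ends."""
--     SEARCH, BLOCK, DONE = 0, 1, 2
--     state = SEARCH
--     result: list[str] = []
--     for line in frontmatter.splitlines():
--         if state == DONE: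
--             continue
--         if state == SEARCH:
--             stripped = line.strip()
--             if stripped.startswith("sources:"):
--                 inline = stripped[len("sources:"):].strip()
--                 if inline == "[]":
--                     state = DONE
--                 elif inline:
--                     result = [strip_quotes(inline)]
--                     state = DONE
--                 else:
--                     state = BLOCK
--         else:  # BLOCK
--             if not line.startswith("  "):
--                 state = DONE
--             else:
--                 item = line.strip()
--                 if item.startswith("- "):
--                     result.append(strip_quotes(item[2:].strip()))
--     return result
-- ===== Notes on version B (the rewrite author's own statement) =====
-- stated objective: alternative
-- what changed: Replaces A's indexed outer loop with a nested inner break-loop and four early returns by a single flat scan over all lines driven by an explicit SEARCH/BLOCK/DONE state machine with one accumulator and a single return at the end.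
import Mathlib
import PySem

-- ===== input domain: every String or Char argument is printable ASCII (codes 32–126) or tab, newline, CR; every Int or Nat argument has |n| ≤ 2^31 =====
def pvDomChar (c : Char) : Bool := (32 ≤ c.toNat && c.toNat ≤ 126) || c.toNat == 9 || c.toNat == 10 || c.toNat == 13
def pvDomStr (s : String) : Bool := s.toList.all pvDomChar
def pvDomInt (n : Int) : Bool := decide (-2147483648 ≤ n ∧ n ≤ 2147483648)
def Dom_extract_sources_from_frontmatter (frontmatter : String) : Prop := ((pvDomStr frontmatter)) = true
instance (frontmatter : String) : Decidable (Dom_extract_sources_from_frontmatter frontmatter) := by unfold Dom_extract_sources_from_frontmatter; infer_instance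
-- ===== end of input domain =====

-- B replaces A's nested loops with early returns by a single flat SEARCH/BLOCK/DONE state-machine scan (alternative); same values everywhere.

-- shared helper (identical in both Python files)
def strip_quotes (value : String) : String :=
  if PySem.Str.len value ≥ 2 ∧ PySem.Str.pyGet? value 0 = PySem.Str.pyGet? value (-1) ∧
     (PySem.Str.pyGet? value 0 = some '"' ∨ PySem.Str.pyGet? value 0 = some '\'') then
    PySem.Str.slice value (some 1) (some (-1))
  else value

-- ===== PORT A =====
-- the inner 'for raw_line in lines[index+1:]' loop with break and append
def pvCollectA (lines : List String) (acc : List String) : List String :=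
  match lines with
  | [] => acc
  | raw_line :: rest =>
    if PySem.Str.startswith raw_line "  " = false then acc
    else
      let item := PySem.Str.strip raw_line
      if PySem.Str.startswith item "- " then
        pvCollectA rest (acc ++ [strip_quotes (PySem.Str.strip (PySem.Str.slice item (some 2) none))])
      else pvCollectA rest acc

-- the outer 'for index, line in enumerate(lines)' loop (lines[index+1:] is the current tail)
def pvGoA (lines : List String) : List String :=
  match lines with
  | [] => []
  | line :: rest =>
    let stripped := PySem.Str.strip line
    if PySem.Str.startswith stripped "sources:" = false then pvGoA rest
    else
      let inline_value := PySem.Str.strip (PySem.Str.slice stripped (some 8) none)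
      if inline_value = "[]" then []
      else if inline_value ≠ "" then [strip_quotes inline_value]
      else pvCollectA rest []

def extract_sources_from_frontmatter (frontmatter : String) : List String :=
  pvGoA (PySem.Str.splitlines frontmatter)

-- ===== PORT B =====
-- the state of B's single-pass scan: SEARCH, BLOCK (with accumulator), DONE (with result)
inductive PvStateB where
  | search : PvStateB
  | block : List String → PvStateB
  | done : List String → PvStateB
deriving DecidableEq, Repr

-- one iteration of B's flat 'for line in frontmatter.splitlines()' loop
def pvStepB (st : PvStateB) (line : String) : PvStateB :=
  match st with
  | .done res => .done res
  | .search =>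
    let stripped := PySem.Str.strip line
    if PySem.Str.startswith stripped "sources:" then
      let inline := PySem.Str.strip (PySem.Str.slice stripped (some 8) none)
      if inline = "[]" then .done []
      else if inline ≠ "" then .done [strip_quotes inline]
      else .block []
    else .search
  | .block acc =>
    if PySem.Str.startswith line "  " = false then .done acc
    else
      let item := PySem.Str.strip line
      if PySem.Str.startswith item "- " then .block (acc ++ [strip_quotes (PySem.Str.strip (PySem.Str.slice item (some 2) none))])
      else .block acc

-- 'return result' at the end of B
def pvFinishB : PvStateB → List String
  | .search => []
  | .block acc => acc
  | .done res => res

def extract_sources_from_frontmatter_alt (frontmatter : String) : List String :=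
  pvFinishB ((PySem.Str.splitlines frontmatter).foldl pvStepB .search)

-- ===== PRECONDITION & SPEC =====
def Spec_extract_sources_from_frontmatter (frontmatter : String) (out : List String) : Prop := out = extract_sources_from_frontmatter_alt frontmatter
instance (frontmatter : String) (out : List String) : Decidable (Spec_extract_sources_from_frontmatter frontmatter out) := by unfold Spec_extract_sources_from_frontmatter; infer_instance

-- ===== CLAIM (what is proved, stated in full; the proofs are below) =====
def Claim_equal_extract_sources_from_frontmatter : Prop := ∀ (frontmatter : String), Dom_extract_sources_from_frontmatter frontmatter → Spec_extract_sources_from_frontmatter frontmatter (extract_sources_from_frontmatter frontmatter)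

-- ===== LEMMAS AND PROOFS =====

theorem pvFoldB_done (lines : List String) (res : List String) :
    lines.foldl pvStepB (.done res) = .done res := by
  induction lines with
  | nil => rfl
  | cons l rest ih => simpa [pvStepB] using ih

theorem pvFoldB_block (lines : List String) (acc : List String) :
    pvFinishB (lines.foldl pvStepB (.block acc)) = pvCollectA lines acc := by
  induction lines generalizing acc with
  | nil => rfl
  | cons l rest ih =>
    cases h : PySem.Chars.startswith l.toList [' ', ' '] with
    | false => simp [List.foldl_cons, pvStepB, h, pvFoldB_done, pvCollectA, pvFinishB]
    | true =>
      cases hq : PySem.Chars.startswith (PySem.Chars.strip l.toList) ['-', ' '] with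
      | true => simp [List.foldl_cons, pvStepB, h, hq, pvCollectA, ih]
      | false => simp [List.foldl_cons, pvStepB, h, hq, pvCollectA, ih]

theorem pvFoldB_search (lines : List String) :
    pvFinishB (lines.foldl pvStepB .search) = pvGoA lines := by
  induction lines with
  | nil => rfl
  | cons l rest ih =>
    cases h : PySem.Chars.startswith (PySem.Chars.strip l.toList) ['s', 'o', 'u', 'r', 'c', 'e', 's', ':'] with
    | false => simpa [List.foldl_cons, pvStepB, h, pvGoA] using ih
    | true =>
      by_cases h1 : PySem.Str.strip (PySem.Str.slice (PySem.Str.strip l) (some 8) none) = "[]"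
      · simp [List.foldl_cons, pvStepB, h, h1, pvGoA, pvFoldB_done, pvFinishB]
      · by_cases h2 : PySem.Str.strip (PySem.Str.slice (PySem.Str.strip l) (some 8) none) = ""
        · simp [List.foldl_cons, pvStepB, h, h1, h2, pvGoA, pvFoldB_block]
        · simp [List.foldl_cons, pvStepB, h, h1, h2, pvGoA, pvFoldB_done, pvFinishB]

-- ===== VERDICT (by name: the statement is the Claim_ definition above) =====
theorem extract_sources_from_frontmatter_spec : Claim_equal_extract_sources_from_frontmatter := by
  intro fm _
  unfold Spec_extract_sources_from_frontmatter extract_sources_from_frontmatter extract_sources_from_frontmatter_alt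
  exact (pvFoldB_search (PySem.Str.splitlines fm)).symm
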